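-- pv_equiv track=rewrite | github.com/SangamNirala/Lawyer20 | backend/ultra_scale_scraping_engine.py | _determine_source_type
-- ===== SOURCE A (Python) =====
-- from typing import Dict, List, Optional, Any, Union, Set, Tuple
--
-- def _determine_source_type(source_config: Optional[Dict[str, Any]]) -> str:
--     """Determine the type of source for specialized processing"""
--     if not source_config:
--         return 'unknown'
--
--     source_name = source_config.get('name', '').lower()
--     base_url = source_config.get('base_url', '').lower()
--     jurisdiction = source_config.get('jurisdiction', '').lower()
--
--     # Government sources
--     if any(indicator in source_name or indicator in base_url for indicator in
--            ['gov', 'government', 'federal', 'department', 'agency', 'bureau']):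
--         return 'government_api'
--
--     # Academic sources
--     elif any(indicator in source_name or indicator in base_url for indicator in
--             ['university', 'college', 'edu', 'academic', 'scholarship', 'law school']):
--         return 'academic_repository'
--
--     # International courts
--     elif any(indicator in source_name for indicator in
--             ['international', 'european court', 'icj', 'echr', 'cjeu']):
--         return 'international_court'
--
--     # Legal news
--     elif any(indicator in source_name for indicator in
--             ['news', 'blog', 'journal', 'magazine', 'reporter']):
--         return 'legal_news'
--
--     # Bar associations
--     elif any(indicator in source_name for indicator in
--             ['bar', 'association', 'lawyer', 'attorney']):
--         return 'bar_association'
--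
--     else:
--         return 'general'
-- ===== SOURCE B (Python) =====
-- # Flat keyword -> priority-rank map; one pass over ALL keywords keeps the best
-- # (lowest) matching rank, then the rank indexes a type table.
-- _TYPES = ['government_api', 'academic_repository', 'international_court',
--           'legal_news', 'bar_association', 'general']
--
-- _KEYWORD_RANK = {
--     'gov': 0, 'government': 0, 'federal': 0, 'department': 0, 'agency': 0, 'bureau': 0,
--     'university': 1, 'college': 1, 'edu': 1, 'academic': 1, 'scholarship': 1, 'law school': 1,
--     'international': 2, 'european court': 2, 'icj': 2, 'echr': 2, 'cjeu': 2,
--     'news': 3, 'blog': 3, 'journal': 3, 'magazine': 3, 'reporter': 3,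
--     'bar': 4, 'association': 4, 'lawyer': 4, 'attorney': 4,
-- }
--
-- def _determine_source_type(source_config):
--     """Determine the type of source for specialized processing."""
--     if not source_config:
--         return 'unknown'
--     name = source_config.get('name', '').lower()
--     url = source_config.get('base_url', '').lower()
--     best = 5  # rank of 'general'
--     for kw, rank in _KEYWORD_RANK.items():
--         # ranks 0 and 1 (government/academic) also search the base_url
--         if rank < best and (kw in name or (rank < 2 and kw in url)):
--             best = rank
--     return _TYPES[best]
-- ===== Notes on version B (the rewrite author's own statement) =====
-- stated objective: alternative
-- what changed: Replaces the five-branch first-match if/elif chain with a flat keyword-to-priority-rank map scanned once in full, keeping the minimum matching rank in an accumulator and indexing a type table with it (ranks 0-1 also search base_url).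
import Mathlib
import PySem

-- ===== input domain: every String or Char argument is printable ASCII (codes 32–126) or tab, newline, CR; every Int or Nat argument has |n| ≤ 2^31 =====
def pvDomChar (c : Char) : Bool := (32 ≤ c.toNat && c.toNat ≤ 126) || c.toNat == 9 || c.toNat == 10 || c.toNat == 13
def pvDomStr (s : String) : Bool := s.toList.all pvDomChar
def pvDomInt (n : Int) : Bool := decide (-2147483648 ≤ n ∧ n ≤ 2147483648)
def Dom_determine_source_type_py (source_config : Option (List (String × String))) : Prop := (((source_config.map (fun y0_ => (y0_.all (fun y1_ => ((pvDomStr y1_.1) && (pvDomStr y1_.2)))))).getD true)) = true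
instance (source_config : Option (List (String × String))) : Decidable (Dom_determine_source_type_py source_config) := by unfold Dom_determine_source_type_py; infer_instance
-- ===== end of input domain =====

-- B replaces the first-match if/elif chain by one full pass over a flat keyword->rank map keeping the minimum matching rank, then indexes a type table (alternative decomposition; same behaviour).


-- ===== PORT A =====
def determine_source_type_py (source_config : Option (List (String × String))) : String :=
  match source_config with
  | none => "unknown"
  | some pairs =>
    if pairs.isEmpty then "unknown" else
    let d := PySem.Dict.ofList pairs
    let source_name := PySem.Str.lower (d.getD "name" "")
    let base_url := PySem.Str.lower (d.getD "base_url" "")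
    let _jurisdiction := PySem.Str.lower (d.getD "jurisdiction" "")
    if (["gov", "government", "federal", "department", "agency", "bureau"]).any
         (fun indicator => PySem.Str.isIn indicator source_name || PySem.Str.isIn indicator base_url) then
      "government_api"
    else if (["university", "college", "edu", "academic", "scholarship", "law school"]).any
         (fun indicator => PySem.Str.isIn indicator source_name || PySem.Str.isIn indicator base_url) then
      "academic_repository"
    else if (["international", "european court", "icj", "echr", "cjeu"]).any
         (fun indicator => PySem.Str.isIn indicator source_name) then
      "international_court"
    else if (["news", "blog", "journal", "magazine", "reporter"]).any
         (fun indicator => PySem.Str.isIn indicator source_name) then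
      "legal_news"
    else if (["bar", "association", "lawyer", "attorney"]).any
         (fun indicator => PySem.Str.isIn indicator source_name) then
      "bar_association"
    else
      "general"

-- ===== PORT B =====
-- B: _TYPES table; _KEYWORD_RANK flat keyword->rank map (dict with distinct keys,
-- so an insertion-ordered association list carries exactly its items).
def pvTypes : List String :=
  ["government_api", "academic_repository", "international_court",
   "legal_news", "bar_association", "general"]

def pvKeywordRank : List (String × Nat) :=
  [("gov", 0), ("government", 0), ("federal", 0), ("department", 0), ("agency", 0), ("bureau", 0),
   ("university", 1), ("college", 1), ("edu", 1), ("academic", 1), ("scholarship", 1), ("law school", 1),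
   ("international", 2), ("european court", 2), ("icj", 2), ("echr", 2), ("cjeu", 2),
   ("news", 3), ("blog", 3), ("journal", 3), ("magazine", 3), ("reporter", 3),
   ("bar", 4), ("association", 4), ("lawyer", 4), ("attorney", 4)]

-- the loop body of Source B's for-loop
def pvStep (name url : String) (best : Nat) (kr : String × Nat) : Nat :=
  if kr.2 < best && (PySem.Str.isIn kr.1 name || (decide (kr.2 < 2) && PySem.Str.isIn kr.1 url)) then kr.2 else best

def determine_source_type_py_alt (source_config : Option (List (String × String))) : String :=
  match source_config with
  | none => "unknown"
  | some pairs =>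
    if pairs.isEmpty then "unknown" else
    let d := PySem.Dict.ofList pairs
    let name := PySem.Str.lower (d.getD "name" "")
    let url := PySem.Str.lower (d.getD "base_url" "")
    let best := pvKeywordRank.foldl (pvStep name url) 5
    pvTypes.getD best ""  -- best is always in [0,5], so the index is in range

-- ===== PRECONDITION & SPEC =====
def Spec_determine_source_type_py (source_config : Option (List (String × String))) (out : String) : Prop := out = determine_source_type_py_alt source_config
instance (source_config : Option (List (String × String))) (out : String) : Decidable (Spec_determine_source_type_py source_config out) := by unfold Spec_determine_source_type_py; infer_instance

-- ===== CLAIM =====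
def Claim_equal_determine_source_type_py : Prop := ∀ (source_config : Option (List (String × String))), Dom_determine_source_type_py source_config → Spec_determine_source_type_py source_config (determine_source_type_py source_config)

-- ===== LEMMAS AND PROOFS =====

-- generic: folding the min-accumulator step over keywords sharing one rank i
theorem pvFoldGen (q : String → Bool) (i : Nat) (ks : List String) (acc : Nat) :
    ks.foldl (fun b k => if i < b && q k then i else b) acc
      = if ks.any q && decide (i < acc) then i else acc := by
  induction ks generalizing acc with
  | nil => simp
  | cons k t ih =>
    simp only [List.foldl_cons, List.any_cons]
    by_cases hq : q k = true
    · by_cases hlt : i < acc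
      · rw [if_pos (by simp [hq, hlt]), ih]
        simp [hq, hlt]
      · rw [if_neg (by simp [hlt]), ih]
        simp [hlt]
    · rw [if_neg (by simp [hq]), ih]
      simp [hq]

-- folding a group of keywords that all carry the same rank i
theorem pvGrp (name url : String) (i : Nat) (ks : List String) (acc : Nat) :
    (ks.map (fun k => (k, i))).foldl (pvStep name url) acc
      = if ks.any (fun k => PySem.Str.isIn k name || (decide (i < 2) && PySem.Str.isIn k url)) && decide (i < acc) then i else acc := by
  rw [List.foldl_map]
  exact pvFoldGen (fun k => PySem.Str.isIn k name || (decide (i < 2) && PySem.Str.isIn k url)) i ks acc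

-- the flat map is the concatenation of its five constant-rank groups
theorem pvKWsplit : pvKeywordRank =
    ((["gov", "government", "federal", "department", "agency", "bureau"]).map (fun k => (k, 0)))
    ++ ((["university", "college", "edu", "academic", "scholarship", "law school"]).map (fun k => (k, 1)))
    ++ ((["international", "european court", "icj", "echr", "cjeu"]).map (fun k => (k, 2)))
    ++ ((["news", "blog", "journal", "magazine", "reporter"]).map (fun k => (k, 3)))
    ++ ((["bar", "association", "lawyer", "attorney"]).map (fun k => (k, 4))) := rfl

-- ===== VERDICT =====
theorem determine_source_type_py_spec : Claim_equal_determine_source_type_py := by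
  intro sc _
  unfold Spec_determine_source_type_py determine_source_type_py determine_source_type_py_alt
  cases sc with
  | none => rfl
  | some pairs =>
    by_cases h : pairs.isEmpty
    · simp [h]
    · simp only [h, Bool.false_eq_true, if_false]
      rw [pvKWsplit]
      simp only [List.foldl_append]
      rw [pvGrp, pvGrp, pvGrp, pvGrp, pvGrp]
      simp only [show (decide ((0:Nat) < 2)) = true from by decide,
        show (decide ((1:Nat) < 2)) = true from by decide,
        show (decide ((2:Nat) < 2)) = false from by decide,
        show (decide ((3:Nat) < 2)) = false from by decide,
        show (decide ((4:Nat) < 2)) = false from by decide,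
        Bool.true_and, Bool.false_and, Bool.or_false]
      generalize (["gov", "government", "federal", "department", "agency", "bureau"]).any
        (fun k => PySem.Str.isIn k (PySem.Str.lower ((PySem.Dict.ofList pairs).getD "name" "")) || PySem.Str.isIn k (PySem.Str.lower ((PySem.Dict.ofList pairs).getD "base_url" ""))) = a0
      generalize (["university", "college", "edu", "academic", "scholarship", "law school"]).any
        (fun k => PySem.Str.isIn k (PySem.Str.lower ((PySem.Dict.ofList pairs).getD "name" "")) || PySem.Str.isIn k (PySem.Str.lower ((PySem.Dict.ofList pairs).getD "base_url" ""))) = a1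
      generalize (["international", "european court", "icj", "echr", "cjeu"]).any
        (fun k => PySem.Str.isIn k (PySem.Str.lower ((PySem.Dict.ofList pairs).getD "name" ""))) = a2
      generalize (["news", "blog", "journal", "magazine", "reporter"]).any
        (fun k => PySem.Str.isIn k (PySem.Str.lower ((PySem.Dict.ofList pairs).getD "name" ""))) = a3
      generalize (["bar", "association", "lawyer", "attorney"]).any
        (fun k => PySem.Str.isIn k (PySem.Str.lower ((PySem.Dict.ofList pairs).getD "name" ""))) = a4
      revert a0 a1 a2 a3 a4
      decide
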